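-- pv_equiv track=rewrite | github.com/fabio-noga/reference-identification | src/Utils.py | removeFakeNewLines
-- ===== SOURCE A (Python) =====
-- def removeFakeNewLines(phrases):
--     for i, phrase in enumerate(phrases):
--         charCounter = 0
--         for char in phrase:
--             if char == '(':
--                 charCounter = charCounter + 1
--             if char == ')':
--                 if charCounter != 0:
--                     charCounter = charCounter - 1
--         if charCounter != 0 and i + 1 < len(phrases):
--             return removeFakeNewLines(mergeArray(phrases, i, i + 1))
--     return phrases
--
-- def mergeArray(array, index1, index2):
--     item1 = str(array[index1])
--     item2 = str(array[index2])
--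
--     merged_item = str(item1 + item2)
--     array[index1] = merged_item
--     array.pop(index2)
--
--     return array
-- ===== SOURCE B (Python) =====
-- def removeFakeNewLines(phrases):
--     # Single left-to-right pass with a running capped parenthesis balance.
--     # Unlike A, this does not mutate the input list (equivalence is about the return value).
--     out = []
--     cur = None
--     c = 0
--     for phrase in phrases:
--         if cur is None:
--             cur = phrase
--             c = 0
--         else:
--             cur += phrase
--         for ch in phrase:
--             if ch == '(':
--                 c += 1
--             elif ch == ')' and c != 0:
--                 c -= 1
--         if c == 0:
--             out.append(cur)
--             cur = None
--     if cur is not None: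
--         out.append(cur)
--     return out
-- ===== Notes on version B (the rewrite author's own statement) =====
-- stated objective: alternative
-- what changed: Replaces A's restart-from-scratch recursion (rescan all phrases from index 0 and mutate the list after every merge) by one left-to-right pass that carries the merged-so-far phrase and its running capped parenthesis balance, emitting a phrase whenever the balance reaches zero.
import Mathlib
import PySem

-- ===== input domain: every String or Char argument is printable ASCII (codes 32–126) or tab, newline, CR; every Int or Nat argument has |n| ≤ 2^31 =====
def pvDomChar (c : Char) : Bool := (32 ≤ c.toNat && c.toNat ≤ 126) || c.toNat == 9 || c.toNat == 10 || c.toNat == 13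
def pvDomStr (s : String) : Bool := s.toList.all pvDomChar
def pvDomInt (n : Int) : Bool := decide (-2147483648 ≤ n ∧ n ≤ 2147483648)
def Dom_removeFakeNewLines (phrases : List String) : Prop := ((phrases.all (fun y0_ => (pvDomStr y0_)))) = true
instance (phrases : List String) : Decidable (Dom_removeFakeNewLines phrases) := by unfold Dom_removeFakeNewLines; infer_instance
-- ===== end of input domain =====

-- B replaces A's restart-from-scratch merge recursion by a single left-to-right pass with a
-- running capped parenthesis balance (return value only: Python A mutates its argument, B does not).

-- ===== PORT A =====
-- A's inner character loop: capped parenthesis counter over the characters of a phrase.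
def pvScan : List Char → Nat → Nat
  | [], c => c
  | ch :: t, c =>
    let c1 := if ch = '(' then c + 1 else c
    let c2 := if ch = ')' then (if c1 ≠ 0 then c1 - 1 else c1) else c1
    pvScan t c2

-- A's enumerate loop: first index i with unbalanced phrase and i+1 < len(phrases).
def pvFindUnbal : List String → Nat → Nat → Option Nat
  | [], _, _ => none
  | p :: tl, i, n =>
    if pvScan p.toList 0 ≠ 0 ∧ i + 1 < n then some i else pvFindUnbal tl (i + 1) n

-- mergeArray from A; only ever called with valid indices (getD "" makes it total there).
def pvMergeArray (array : List String) (i1 i2 : Nat) : List String :=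
  let item1 := array.getD i1 ""
  let item2 := array.getD i2 ""
  ((array.set i1 (item1 ++ item2)).eraseIdx i2)

theorem pvFindUnbal_lt : ∀ (l : List String) (i n j : Nat), pvFindUnbal l i n = some j → j + 1 < n := by
  intro l
  induction l with
  | nil => intro i n j h; simp [pvFindUnbal] at h
  | cons p tl ih =>
    intro i n j h
    unfold pvFindUnbal at h
    split at h
    · rename_i hc; cases h; exact hc.2
    · exact ih _ _ _ h

def removeFakeNewLines (phrases : List String) : List String :=
  match h : pvFindUnbal phrases 0 phrases.length with
  | none => phrases
  | some i => removeFakeNewLines (pvMergeArray phrases i (i + 1))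
termination_by phrases.length
decreasing_by
  have hlt := pvFindUnbal_lt phrases 0 phrases.length _ h
  simp [pvMergeArray, List.length_eraseIdx, List.length_set, hlt]
  omega

-- ===== PORT B =====
-- B's loop, one step per phrase: state = (pending merged phrase, running capped balance).
def pvAltGo : List String → Option String → Nat → List String
  | [], none, _ => []
  | [], some cur, _ => [cur]
  | p :: tl, none, _ =>
    let c := pvScan p.toList 0
    if c = 0 then p :: pvAltGo tl none 0 else pvAltGo tl (some p) c
  | p :: tl, some cur, c =>
    let c' := pvScan p.toList c
    if c' = 0 then (cur ++ p) :: pvAltGo tl none 0 else pvAltGo tl (some (cur ++ p)) c'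

def removeFakeNewLines_alt (phrases : List String) : List String :=
  pvAltGo phrases none 0

-- ===== PRECONDITION & SPEC =====
def Spec_removeFakeNewLines (phrases : List String) (out : List String) : Prop := out = removeFakeNewLines_alt phrases
instance (phrases : List String) (out : List String) : Decidable (Spec_removeFakeNewLines phrases out) := by unfold Spec_removeFakeNewLines; infer_instance

-- ===== CLAIM (what is proved, stated in full; the proofs are below) =====
def Claim_equal_removeFakeNewLines : Prop := ∀ (phrases : List String), Dom_removeFakeNewLines phrases → Spec_removeFakeNewLines phrases (removeFakeNewLines phrases)

-- ===== LEMMAS AND PROOFS =====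

-- the counter is a state machine: scanning a concatenation continues from the intermediate state
theorem pvScan_append (a b : List Char) (c : Nat) : pvScan (a ++ b) c = pvScan b (pvScan a c) := by
  induction a generalizing c with
  | nil => simp [pvScan]
  | cons ch t ih => simp [pvScan, ih]

theorem pvFindUnbal_shift (l : List String) : ∀ (i n : Nat),
    pvFindUnbal l (i + 1) (n + 1) = (pvFindUnbal l i n).map (· + 1) := by
  induction l with
  | nil => intro i n; simp [pvFindUnbal]
  | cons p tl ih =>
    intro i n
    unfold pvFindUnbal
    by_cases hs : pvScan p.toList 0 ≠ 0 ∧ i + 1 < n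
    · rw [if_pos ⟨hs.1, by omega⟩, if_pos hs]; rfl
    · rw [if_neg (fun hc => hs ⟨hc.1, by omega⟩), if_neg hs, ih]

theorem pvFindUnbal_cons (p : String) (tl : List String) (i n : Nat) :
    pvFindUnbal (p :: tl) i n
      = if pvScan p.toList 0 ≠ 0 ∧ i + 1 < n then some i else pvFindUnbal tl (i + 1) n := by
  simp only [pvFindUnbal]

theorem rf_none (l : List String) (h : pvFindUnbal l 0 l.length = none) :
    removeFakeNewLines l = l := by
  rw [removeFakeNewLines.eq_def]
  split
  · rfl
  · rename_i i heq; rw [h] at heq; cases heq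

theorem rf_some (l : List String) (i : Nat) (h : pvFindUnbal l 0 l.length = some i) :
    removeFakeNewLines l = removeFakeNewLines (pvMergeArray l i (i + 1)) := by
  rw [removeFakeNewLines.eq_def]
  split
  · rename_i heq; rw [h] at heq; cases heq
  · rename_i j heq; rw [h] at heq; cases heq; rfl

theorem merge_cons (p : String) (tl : List String) (j : Nat) :
    pvMergeArray (p :: tl) (j + 1) (j + 2) = p :: pvMergeArray tl j (j + 1) := by
  simp [pvMergeArray]

-- A skips a balanced head phrase
theorem rf_cons_bal : ∀ (n : Nat) (tl : List String) (p : String), tl.length ≤ n →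
    pvScan p.toList 0 = 0 → removeFakeNewLines (p :: tl) = p :: removeFakeNewLines tl := by
  intro n
  induction n with
  | zero =>
    intro tl p hlen hp
    have htl : tl = [] := List.length_eq_zero_iff.mp (Nat.le_zero.mp hlen)
    subst htl
    rw [rf_none [p] (by simp [pvFindUnbal]), rf_none [] (by simp [pvFindUnbal])]
  | succ n ih =>
    intro tl p hlen hp
    have hfind : pvFindUnbal (p :: tl) 0 (p :: tl).length
        = (pvFindUnbal tl 0 tl.length).map (· + 1) := by
      rw [pvFindUnbal_cons, if_neg (by simp [hp]), List.length_cons, pvFindUnbal_shift]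
    cases hX : pvFindUnbal tl 0 tl.length with
    | none =>
      rw [rf_none (p :: tl) (by rw [hfind, hX]; rfl), rf_none tl hX]
    | some j =>
      have hj1 : j + 1 < tl.length := pvFindUnbal_lt _ _ _ _ hX
      have hsome : pvFindUnbal (p :: tl) 0 (p :: tl).length = some (j + 1) := by
        rw [hfind, hX]; rfl
      rw [rf_some _ _ hsome, merge_cons,
          ih (pvMergeArray tl j (j + 1)) p
            (by simp [pvMergeArray, List.length_eraseIdx, List.length_set, hj1]; omega) hp,
          rf_some tl j hX]

-- B performs A's first merge: merging an unbalanced head into its successor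
theorem alt_merge (p q : String) (tl : List String) (hp : ¬ pvScan p.toList 0 = 0) :
    removeFakeNewLines_alt (p :: q :: tl) = removeFakeNewLines_alt ((p ++ q) :: tl) := by
  simp only [removeFakeNewLines_alt, pvAltGo, String.toList_append, pvScan_append, if_neg hp]

theorem rf_eq_alt : ∀ (n : Nat) (l : List String), l.length ≤ n →
    removeFakeNewLines l = removeFakeNewLines_alt l := by
  intro n
  induction n with
  | zero =>
    intro l hl
    have : l = [] := List.length_eq_zero_iff.mp (Nat.le_zero.mp hl)
    subst this
    rw [rf_none [] (by simp [pvFindUnbal])]; rfl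
  | succ n ih =>
    intro l hl
    match l with
    | [] => rw [rf_none [] (by simp [pvFindUnbal])]; rfl
    | [p] =>
      by_cases hp : pvScan p.toList 0 = 0
      · rw [rf_none [p] (by simp [pvFindUnbal])]
        simp [removeFakeNewLines_alt, pvAltGo, hp]
      · rw [rf_none [p] (by simp [pvFindUnbal])]
        simp [removeFakeNewLines_alt, pvAltGo, hp]
    | p :: q :: tl =>
      by_cases hp : pvScan p.toList 0 = 0
      · rw [rf_cons_bal (q :: tl).length (q :: tl) p le_rfl hp,
            ih (q :: tl) (by simpa using Nat.le_of_succ_le_succ hl)]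
        simp [removeFakeNewLines_alt, pvAltGo, hp]
      · have hsome : pvFindUnbal (p :: q :: tl) 0 (p :: q :: tl).length = some 0 := by
          rw [pvFindUnbal_cons, if_pos ⟨hp, by simp⟩]
        have hmerge : pvMergeArray (p :: q :: tl) 0 1 = (p ++ q) :: tl := by
          simp [pvMergeArray]
        rw [rf_some _ _ hsome, hmerge, alt_merge p q tl hp]
        exact ih ((p ++ q) :: tl) (by simp at hl ⊢; omega)

-- ===== VERDICT (by name: the statement is the Claim_ definition above) =====
theorem removeFakeNewLines_spec : Claim_equal_removeFakeNewLines := by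
  intro phrases _
  unfold Spec_removeFakeNewLines
  exact rf_eq_alt phrases.length phrases le_rfl
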